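-- pv_equiv track=rewrite | github.com/wilmurillo-ai/Design-Assistant | .skills/openclaw-skills/skills/rajkiranvs/remote-job-hunter/src/apply.py | build_applied_whatsapp_message
-- ===== SOURCE A (Python) =====
-- def build_applied_whatsapp_message(results, profile_name):
--     """Build the WhatsApp summary after applying."""
--     applied = [r for r in results if r.get("result", {}).get("status") == "applied"]
--     failed = [r for r in results if r.get("result", {}).get("status") == "failed"]
--     skipped = [r for r in results if r.get("result", {}).get("status") in ("skipped", "dry_run")]
--
--     lines = [f"✅ *{profile_name} — Applications Submitted*\n"]
--
--     if applied:
--         lines.append(f"*Applied to {len(applied)} jobs:*")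
--         for i, r in enumerate(applied, 1):
--             job = r.get("job", {})
--             method = r.get("result", {}).get("method", "")
--             lines.append(f"{i}. {job.get('title', 'Unknown')} — {job.get('company', 'Unknown')} [{method}]")
--             lines.append(f"   🔗 {job.get('url', '')}")
--
--     if failed:
--         lines.append(f"\n*⚠️ Failed ({len(failed)}):*")
--         for r in failed:
--             job = r.get("job", {})
--             reason = r.get("result", {}).get("reason", "")
--             lines.append(f"• {job.get('title', 'Unknown')} — {reason[:60]}")
--
--     if skipped:
--         lines.append(f"\n*Skipped ({len(skipped)}):* your request")
--
--     lines.append(f"\n_Full log: ~/.openclaw/workspace/applied_jobs.json_")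
--     return "\n".join(lines)
-- ===== SOURCE B (Python) =====
-- def build_applied_whatsapp_message(results, profile_name):
--     """Build the WhatsApp summary after applying (single-pass bucketing, lines formatted on the fly)."""
--     applied_lines = []
--     failed_lines = []
--     n_skipped = 0
--     for r in results:
--         res = r.get("result", {})
--         status = res.get("status")
--         job = r.get("job", {})
--         if status == "applied":
--             i = len(applied_lines) // 2 + 1
--             applied_lines.append(f"{i}. {job.get('title', 'Unknown')} — {job.get('company', 'Unknown')} [{res.get('method', '')}]")
--             applied_lines.append(f"   🔗 {job.get('url', '')}")
--         elif status == "failed":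
--             failed_lines.append(f"• {job.get('title', 'Unknown')} — {res.get('reason', '')[:60]}")
--         elif status in ("skipped", "dry_run"):
--             n_skipped += 1
--     parts = [f"✅ *{profile_name} — Applications Submitted*\n"]
--     if applied_lines:
--         parts.append(f"*Applied to {len(applied_lines) // 2} jobs:*")
--         parts.extend(applied_lines)
--     if failed_lines:
--         parts.append(f"\n*⚠️ Failed ({len(failed_lines)}):*")
--         parts.extend(failed_lines)
--     if n_skipped:
--         parts.append(f"\n*Skipped ({n_skipped}):* your request")
--     parts.append(f"\n_Full log: ~/.openclaw/workspace/applied_jobs.json_")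
--     return "\n".join(parts)
-- ===== Notes on version B (the rewrite author's own statement) =====
-- stated objective: alternative
-- what changed: Three whole-list filter comprehensions followed by separate formatting loops are replaced by a single dispatch pass over results that formats each applied/failed line on the fly and counts skipped records, after which the prebuilt buckets are just concatenated.
import Mathlib
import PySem

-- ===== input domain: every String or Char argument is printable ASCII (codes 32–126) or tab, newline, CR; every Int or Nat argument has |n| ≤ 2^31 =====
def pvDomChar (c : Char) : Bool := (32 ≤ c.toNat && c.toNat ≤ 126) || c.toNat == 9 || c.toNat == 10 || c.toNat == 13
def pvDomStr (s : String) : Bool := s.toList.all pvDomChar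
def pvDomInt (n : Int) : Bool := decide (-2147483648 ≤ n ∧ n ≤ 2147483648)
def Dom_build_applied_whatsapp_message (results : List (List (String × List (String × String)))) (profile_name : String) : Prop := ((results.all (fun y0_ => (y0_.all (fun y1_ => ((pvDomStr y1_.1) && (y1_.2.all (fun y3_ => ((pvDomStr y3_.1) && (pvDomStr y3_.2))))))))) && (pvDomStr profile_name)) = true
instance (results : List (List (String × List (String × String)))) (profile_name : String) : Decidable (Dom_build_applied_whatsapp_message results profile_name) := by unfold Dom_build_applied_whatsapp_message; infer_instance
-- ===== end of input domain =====

-- B changes the decomposition: three whole-list filter passes become one bucketing pass that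
-- formats each line on the fly; objective 'alternative' (byte-identical output, similar cost).

-- shared helpers: dict lookups (first match = Python dict.get on an assoc list) and the f-string line formats,
-- identical in both Pythons, so shared here by both ports.
def pvAlGet (d : List (String × String)) (k : String) : Option String :=
  (d.find? (fun p => p.1 == k)).map (·.2)
def pvAlGetD (d : List (String × String)) (k : String) (dflt : String) : String :=
  (pvAlGet d k).getD dflt
-- r.get("result", {}) / r.get("job", {})
def pvRGet (r : List (String × List (String × String))) (k : String) : List (String × String) :=
  ((r.find? (fun p => p.1 == k)).map (·.2)).getD []
def pvStatus (r : List (String × List (String × String))) : Option String :=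
  pvAlGet (pvRGet r "result") "status"
def pvHdr (profile_name : String) : String :=
  "✅ *" ++ profile_name ++ " — Applications Submitted*\n"
def pvAppliedLine1 (i : Int) (r : List (String × List (String × String))) : String :=
  PySem.Int.toStr i ++ ". " ++ pvAlGetD (pvRGet r "job") "title" "Unknown" ++ " — " ++
    pvAlGetD (pvRGet r "job") "company" "Unknown" ++ " [" ++ pvAlGetD (pvRGet r "result") "method" "" ++ "]"
def pvAppliedLine2 (r : List (String × List (String × String))) : String :=
  "   🔗 " ++ pvAlGetD (pvRGet r "job") "url" ""
def pvFailedLine (r : List (String × List (String × String))) : String :=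
  "• " ++ pvAlGetD (pvRGet r "job") "title" "Unknown" ++ " — " ++
    PySem.Str.slice (pvAlGetD (pvRGet r "result") "reason" "") none (some 60)
def pvFooter : String := "\n_Full log: ~/.openclaw/workspace/applied_jobs.json_"

-- ===== PORT A =====
def build_applied_whatsapp_message (results : List (List (String × List (String × String)))) (profile_name : String) : String :=
  let applied := results.filter (fun r => pvStatus r == some "applied")
  let failed := results.filter (fun r => pvStatus r == some "failed")
  let skipped := results.filter (fun r => pvStatus r == some "skipped" || pvStatus r == some "dry_run")
  let lines : List String := [pvHdr profile_name]
  let lines :=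
    if applied.isEmpty then lines else
      (PySem.List.enumerate applied 1).foldl
        (fun acc p => acc ++ [pvAppliedLine1 p.1 p.2, pvAppliedLine2 p.2])
        (lines ++ ["*Applied to " ++ PySem.Int.toStr (applied.length : Int) ++ " jobs:*"])
  let lines :=
    if failed.isEmpty then lines else
      failed.foldl (fun acc r => acc ++ [pvFailedLine r])
        (lines ++ ["\n*⚠️ Failed (" ++ PySem.Int.toStr (failed.length : Int) ++ "):*"])
  let lines :=
    if skipped.isEmpty then lines else
      lines ++ ["\n*Skipped (" ++ PySem.Int.toStr (skipped.length : Int) ++ "):* your request"]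
  PySem.Str.join "\n" (lines ++ [pvFooter])

-- ===== PORT B =====
-- one pass: bucket each record, formatting its line(s) immediately
def pvStep (st : List String × List String × Nat) (r : List (String × List (String × String))) :
    List String × List String × Nat :=
  let status := pvStatus r
  if status == some "applied" then
    let i := st.1.length / 2 + 1
    (st.1 ++ [pvAppliedLine1 (i : Int) r, pvAppliedLine2 r], st.2.1, st.2.2)
  else if status == some "failed" then
    (st.1, st.2.1 ++ [pvFailedLine r], st.2.2)
  else if status == some "skipped" || status == some "dry_run" then
    (st.1, st.2.1, st.2.2 + 1)
  else st

def build_applied_whatsapp_message_alt (results : List (List (String × List (String × String)))) (profile_name : String) : String :=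
  let st := results.foldl pvStep ([], [], 0)
  let parts : List String := [pvHdr profile_name]
  let parts :=
    if st.1.isEmpty then parts else
      parts ++ ["*Applied to " ++ PySem.Int.toStr ((st.1.length / 2 : Nat) : Int) ++ " jobs:*"] ++ st.1
  let parts :=
    if st.2.1.isEmpty then parts else
      parts ++ ["\n*⚠️ Failed (" ++ PySem.Int.toStr (st.2.1.length : Int) ++ "):*"] ++ st.2.1
  let parts :=
    if st.2.2 == 0 then parts else
      parts ++ ["\n*Skipped (" ++ PySem.Int.toStr (st.2.2 : Int) ++ "):* your request"]
  PySem.Str.join "\n" (parts ++ [pvFooter])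

-- ===== PRECONDITION & SPEC =====
def Spec_build_applied_whatsapp_message (results : List (List (String × List (String × String)))) (profile_name : String) (out : String) : Prop := out = build_applied_whatsapp_message_alt results profile_name
instance (results : List (List (String × List (String × String)))) (profile_name : String) (out : String) : Decidable (Spec_build_applied_whatsapp_message results profile_name out) := by unfold Spec_build_applied_whatsapp_message; infer_instance

-- ===== CLAIM (what is proved, stated in full; the proofs are below) =====
def Claim_equal_build_applied_whatsapp_message : Prop := ∀ (results : List (List (String × List (String × String)))) (profile_name : String), Dom_build_applied_whatsapp_message results profile_name → Spec_build_applied_whatsapp_message results profile_name (build_applied_whatsapp_message results profile_name)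

-- ===== LEMMAS AND PROOFS =====

-- the applied-bucket lines of B, as a function of the already-filtered applied records and a records-so-far offset
def pvFmtApplied (m : Nat) : List (List (String × List (String × String))) → List String
  | [] => []
  | r :: rs => pvAppliedLine1 ((m + 1 : Nat) : Int) r :: pvAppliedLine2 r :: pvFmtApplied (m + 1) rs

theorem pvFmtApplied_length (l : List (List (String × List (String × String)))) :
    ∀ m, (pvFmtApplied m l).length = 2 * l.length := by
  induction l with
  | nil => intro m; rfl
  | cons r rs ih => intro m; simp [pvFmtApplied, ih]; omega

theorem pvFold_spec (xs : List (List (String × List (String × String)))) :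
    ∀ (a f : List String) (k m : Nat), a.length = 2 * m →
      xs.foldl pvStep (a, f, k) =
        (a ++ pvFmtApplied m (xs.filter (fun r => pvStatus r == some "applied")),
         f ++ (xs.filter (fun r => pvStatus r == some "failed")).map pvFailedLine,
         k + (xs.filter (fun r => pvStatus r == some "skipped" || pvStatus r == some "dry_run")).length) := by
  induction xs with
  | nil => intro a f k m _; simp [pvFmtApplied]
  | cons r rs ih =>
    intro a f k m hm
    by_cases h1 : pvStatus r == some "applied"
    · have hne2 : ¬ (pvStatus r == some "failed") := by
        simp at h1; simp [h1]
      have hne3 : ¬ (pvStatus r == some "skipped" || pvStatus r == some "dry_run") := by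
        simp at h1; simp [h1]
      have hstep : pvStep (a, f, k) r =
          (a ++ [pvAppliedLine1 ((m + 1 : Nat) : Int) r, pvAppliedLine2 r], f, k) := by
        have hdiv : a.length / 2 + 1 = m + 1 := by omega
        simp [pvStep, h1, hdiv]
      rw [List.foldl_cons, hstep,
        ih (a ++ [pvAppliedLine1 ((m + 1 : Nat) : Int) r, pvAppliedLine2 r]) f k (m + 1)
          (by simp [hm]; omega)]
      simp [h1, hne2, hne3, pvFmtApplied]
    · by_cases h2 : pvStatus r == some "failed"
      · have hne3 : ¬ (pvStatus r == some "skipped" || pvStatus r == some "dry_run") := by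
          simp at h2; simp [h2]
        have hstep : pvStep (a, f, k) r = (a, f ++ [pvFailedLine r], k) := by
          simp [pvStep, h1, h2]
        rw [List.foldl_cons, hstep, ih a (f ++ [pvFailedLine r]) k m hm]
        simp [h1, h2, hne3]
      · by_cases h3 : pvStatus r == some "skipped" || pvStatus r == some "dry_run"
        · have hstep : pvStep (a, f, k) r = (a, f, k + 1) := by
            simp [pvStep, h1, h2]
            intro h; simp [h] at h3; simp [h3]
          rw [List.foldl_cons, hstep, ih a f (k + 1) m hm]
          simp [h1, h2, h3]; omega
        · have hstep : pvStep (a, f, k) r = (a, f, k) := by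
            simp at h3
            simp [pvStep, h1, h2, h3]
          rw [List.foldl_cons, hstep, ih a f k m hm]
          simp [h1, h2, h3]

-- A's enumerated applied loop produces the same lines
theorem pvEnumFold_spec (l : List (List (String × List (String × String)))) :
    ∀ (m : Nat) (L : List String),
      (PySem.List.enumerate l ((m : Int) + 1)).foldl
          (fun acc p => acc ++ [pvAppliedLine1 p.1 p.2, pvAppliedLine2 p.2]) L
        = L ++ pvFmtApplied m l := by
  induction l with
  | nil => intro m L; simp [PySem.List.enumerate_nil, pvFmtApplied]
  | cons r rs ih =>
    intro m L
    rw [PySem.List.enumerate_cons]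
    simp only [List.foldl_cons]
    have : ((m : Int) + 1 + 1) = ((m + 1 : Nat) : Int) + 1 := by push_cast; ring
    rw [this, ih (m + 1)]
    simp [pvFmtApplied]

theorem pvEnumFold_one (l : List (List (String × List (String × String)))) (L : List String) :
    (PySem.List.enumerate l 1).foldl
        (fun acc p => acc ++ [pvAppliedLine1 p.1 p.2, pvAppliedLine2 p.2]) L
      = L ++ pvFmtApplied 0 l := by
  have h : (1 : Int) = ((0 : Nat) : Int) + 1 := by norm_num
  rw [h]; exact pvEnumFold_spec l 0 L

theorem pvFailedFold_spec (l : List (List (String × List (String × String)))) :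
    ∀ (L : List String),
      l.foldl (fun acc r => acc ++ [pvFailedLine r]) L = L ++ l.map pvFailedLine := by
  induction l with
  | nil => intro L; simp
  | cons r rs ih => intro L; simp [ih]

-- ===== VERDICT (by name: the statement is the Claim_ definition above) =====
theorem build_applied_whatsapp_message_spec : Claim_equal_build_applied_whatsapp_message := by
  intro results profile_name _
  unfold Spec_build_applied_whatsapp_message
  unfold build_applied_whatsapp_message build_applied_whatsapp_message_alt
  rw [pvFold_spec results [] [] 0 0 rfl]
  simp only [List.nil_append, Nat.zero_add]
  set applied := results.filter (fun r => pvStatus r == some "applied") with hA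
  set failed := results.filter (fun r => pvStatus r == some "failed") with hF
  set skipped := results.filter (fun r => pvStatus r == some "skipped" || pvStatus r == some "dry_run") with hS
  have hlen : (pvFmtApplied 0 applied).length = 2 * applied.length := pvFmtApplied_length applied 0
  have hempA : (pvFmtApplied 0 applied).isEmpty = applied.isEmpty := by
    cases applied with
    | nil => rfl
    | cons r rs => simp [pvFmtApplied]
  have hempF : ((failed.map pvFailedLine).isEmpty) = failed.isEmpty := by
    cases failed <;> simp
  have hempS : (skipped.length == 0) = skipped.isEmpty := by
    cases skipped <;> simp
  rw [pvEnumFold_one applied, pvFailedFold_spec failed]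
  simp only [hempA, hempF, hempS, hlen, List.length_map]
  split_ifs <;> simp [List.append_assoc]
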